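-- pv_equiv track=rewrite | github.com/dumdumai/competitor-analysis | backend/agents/quality_agent.py | _extract_weaknesses
-- ===== SOURCE A (Python) =====
-- from typing import Dict, Any, List
--
-- def _extract_weaknesses(results: List[Dict[str, Any]]) -> List[str]:
--     """Extract potential weaknesses or challenges"""
--     weaknesses = []
--     negative_keywords = ['challenge', 'issue', 'problem', 'criticism', 'controversy', 'decline']
--
--     for result in results:
--         content = result.get('content', '').lower()
--         for keyword in negative_keywords:
--             if keyword in content:
--                 weaknesses.append(f"Potential challenges identified")
--                 break
--
--     return list(set(weaknesses[:2]))  # Return up to 2 unique weaknesses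
-- ===== SOURCE B (Python) =====
-- from typing import Dict, Any, List
--
-- def _extract_weaknesses(results: List[Dict[str, Any]]) -> List[str]:
--     """Extract potential weaknesses or challenges"""
--     negative_keywords = ['challenge', 'issue', 'problem', 'criticism', 'controversy', 'decline']
--     if any(kw in result.get('content', '').lower()
--            for result in results for kw in negative_keywords):
--         return ["Potential challenges identified"]
--     return []
-- ===== Notes on version B (the rewrite author's own statement) =====
-- stated objective: simpler
-- what changed: Replaced the accumulator list built per matching result plus [:2] slice and set() dedup with a single any() predicate over results x keywords returning a constant one-element list or an empty list.
import Mathlib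
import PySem

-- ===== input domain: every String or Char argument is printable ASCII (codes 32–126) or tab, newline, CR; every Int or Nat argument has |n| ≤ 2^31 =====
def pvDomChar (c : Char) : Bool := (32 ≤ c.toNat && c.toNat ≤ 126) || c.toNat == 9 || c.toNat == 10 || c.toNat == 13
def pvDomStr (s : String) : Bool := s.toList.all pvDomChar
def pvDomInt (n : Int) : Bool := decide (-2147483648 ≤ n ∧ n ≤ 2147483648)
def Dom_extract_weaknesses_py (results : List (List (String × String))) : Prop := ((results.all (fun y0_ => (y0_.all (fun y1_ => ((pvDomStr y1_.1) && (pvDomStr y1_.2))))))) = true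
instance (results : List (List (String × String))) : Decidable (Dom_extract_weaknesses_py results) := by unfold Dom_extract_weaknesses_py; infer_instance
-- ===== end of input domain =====

-- B replaces A's accumulator list + [:2] slice + set() dedup with a single any() predicate (simpler).

-- ===== PORT A =====
def pvKeywords : List String :=
  ["challenge", "issue", "problem", "criticism", "controversy", "decline"]

-- per-result body of A's outer loop: inner for/break appends the string at most once
def extract_weaknesses_py (results : List (List (String × String))) : List String :=
  let weaknesses : List String :=
    results.foldl (fun acc result =>
      let content := PySem.Str.lower ((PySem.Dict.mk result).getD "content" "")
      if pvKeywords.any (fun kw => PySem.Str.isIn kw content) then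
        acc ++ ["Potential challenges identified"]
      else acc) []
  PySem.Set.ofList (PySem.List.slice weaknesses none (some 2))

-- ===== PORT B =====
def extract_weaknesses_py_alt (results : List (List (String × String))) : List String :=
  if results.any (fun result =>
      pvKeywords.any (fun kw =>
        PySem.Str.isIn kw (PySem.Str.lower ((PySem.Dict.mk result).getD "content" "")))) then
    ["Potential challenges identified"]
  else []

-- ===== PRECONDITION & SPEC =====
def Spec_extract_weaknesses_py (results : List (List (String × String))) (out : List String) : Prop := out = extract_weaknesses_py_alt results
instance (results : List (List (String × String))) (out : List String) : Decidable (Spec_extract_weaknesses_py results out) := by unfold Spec_extract_weaknesses_py; infer_instance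

-- ===== CLAIM (what is proved, stated in full; the proofs are below) =====
def Claim_equal_extract_weaknesses_py : Prop := ∀ (results : List (List (String × String))), Dom_extract_weaknesses_py results → Spec_extract_weaknesses_py results (extract_weaknesses_py results)

-- ===== LEMMAS AND PROOFS =====

-- the per-result predicate both loops test
def pvHit (result : List (String × String)) : Bool :=
  pvKeywords.any (fun kw =>
    PySem.Str.isIn kw (PySem.Str.lower ((PySem.Dict.mk result).getD "content" "")))

-- A's loop builds a replicate of the matching count (appended after any acc)
theorem pvFoldl_replicate (results : List (List (String × String))) (acc : List String) :
    results.foldl (fun acc result =>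
      if pvHit result then acc ++ ["Potential challenges identified"] else acc) acc
    = acc ++ List.replicate (results.countP pvHit) "Potential challenges identified" := by
  induction results generalizing acc with
  | nil => simp
  | cons r rs ih =>
    rw [List.foldl_cons, List.countP_cons]
    by_cases h : pvHit r = true
    · rw [if_pos h, ih, List.append_assoc]
      rw [if_pos h]
      simp [← List.replicate_succ]
    · rw [if_neg h, ih, if_neg (by simpa using h)]
      simp

theorem pvSet_take_replicate (n : Nat) (s : String) :
    PySem.Set.ofList ((List.replicate n s).take 2) = if n = 0 then [] else [s] := by
  match n with
  | 0 => simp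
  | 1 => simp [PySem.Set.ofList, PySem.Set.add, PySem.Set.contains, PySem.Set.empty]
  | (m+2) => simp [PySem.Set.ofList, PySem.Set.add, PySem.Set.contains, PySem.Set.empty,
      List.replicate_succ]

-- ===== VERDICT (by name: the statement is the Claim_ definition above) =====
theorem extract_weaknesses_py_spec : Claim_equal_extract_weaknesses_py := by
  intro results _
  show PySem.Set.ofList (PySem.List.slice
      (results.foldl (fun acc result =>
        if pvHit result then acc ++ ["Potential challenges identified"] else acc) [])
      none (some 2)) = extract_weaknesses_py_alt results
  rw [pvFoldl_replicate, List.nil_append,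
      show ((2 : Int) = ((2 : Nat) : Int)) from rfl, PySem.List.slice_to_natCast,
      pvSet_take_replicate]
  unfold extract_weaknesses_py_alt
  by_cases h : results.any pvHit = true
  · have hc : results.countP pvHit ≠ 0 := by
      rw [List.any_eq_true] at h
      obtain ⟨x, hx, hp⟩ := h
      have := List.countP_pos_iff.mpr ⟨x, hx, hp⟩
      omega
    rw [if_neg hc, if_pos (by exact h)]
  · have hc : results.countP pvHit = 0 := by
      rw [List.countP_eq_zero]
      intro x hx
      simp only [List.any_eq_true, not_exists, not_and] at h
      exact fun hp => h x hx hp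
    rw [if_pos hc, if_neg (by simpa [pvHit] using h)]
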